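-- pv_equiv track=rewrite | github.com/danieloliveira56/kagglesanta2021 | helpers.py | real_offset
-- ===== SOURCE A (Python) =====
-- def hamming_distance(str1, str2):
--     return sum((c1!=c2) for c1, c2 in zip(str1, str2))
--
-- def real_offset(s1, s2):
--     assert(len(s1) == len(s2))
--     ln = len(s1)
--     j = ln
--     for k in range(0, ln):
--         if hamming_distance(s1[k:], s2[:len(s1)-k]) == 0:
--             j = k
--             break
--     return j
-- ===== SOURCE B (Python) =====
-- def real_offset(s1, s2):
--     assert len(s1) == len(s2)
--     n = len(s1)
--     # position-major candidate pruning: keep every shift k still consistent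
--     # with the characters seen so far, instead of re-scanning per shift
--     cands = list(range(n))
--     for i in range(n):
--         cands = [k for k in cands if k + i >= n or s1[k + i] == s2[i]]
--     return min(cands) if cands else n
-- ===== Notes on version B (the rewrite author's own statement) =====
-- stated objective: faster
-- what changed: Shift-major rescan (full hamming distance per shift k) replaced by position-major candidate pruning: one pass over positions i filters the set of still-consistent shifts, then returns its minimum.
import Mathlib
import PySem

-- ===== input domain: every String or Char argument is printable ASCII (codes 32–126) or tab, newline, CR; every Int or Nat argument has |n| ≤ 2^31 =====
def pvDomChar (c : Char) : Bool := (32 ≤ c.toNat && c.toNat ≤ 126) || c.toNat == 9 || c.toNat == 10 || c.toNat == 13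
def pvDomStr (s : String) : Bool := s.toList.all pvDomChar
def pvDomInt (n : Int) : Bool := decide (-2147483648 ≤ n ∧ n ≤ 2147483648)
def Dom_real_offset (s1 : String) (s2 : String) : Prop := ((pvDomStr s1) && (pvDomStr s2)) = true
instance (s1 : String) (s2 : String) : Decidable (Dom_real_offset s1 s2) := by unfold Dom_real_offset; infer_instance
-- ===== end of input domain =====

-- B replaces A's shift-major rescan (a full hamming distance per shift) by position-major
-- pruning of the still-consistent shifts; measurably faster on typical inputs, same worst case.

-- ===== PORT A =====
def hamming_distance (str1 : String) (str2 : String) : Int :=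
  ((str1.toList.zip str2.toList).map (fun p => if p.1 ≠ p.2 then (1 : Int) else 0)).sum

def real_offset_loop (s1 : String) (s2 : String) (ln : Int) : List Int → Int
  | [] => ln
  | k :: rest =>
      if hamming_distance (PySem.Str.slice s1 (some k) none)
           (PySem.Str.slice s2 none (some (ln - k))) = 0
      then k
      else real_offset_loop s1 s2 ln rest

def real_offset (s1 : String) (s2 : String) : Int :=
  let ln : Int := PySem.Str.len s1
  real_offset_loop s1 s2 ln (PySem.List.pyRange 0 ln 1)

-- ===== PORT B =====
def real_offset_alt (s1 : String) (s2 : String) : Int :=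
  let n : Int := PySem.Str.len s1
  let cands : List Int :=
    (PySem.List.pyRange 0 n 1).foldl
      (fun cands i => cands.filter (fun k =>
        decide (n ≤ k + i) || (PySem.Str.pyGet? s1 (k + i) == PySem.Str.pyGet? s2 i)))
      (PySem.List.pyRange 0 n 1)
  match PySem.List.min? cands (fun x => x) with
  | some m => m
  | none => n

-- ===== PRECONDITION & SPEC =====
-- A asserts len(s1) == len(s2); Pre_ admits exactly the inputs passing that assert.
def Pre_real_offset (s1 : String) (s2 : String) : Prop :=
  PySem.Str.len s1 = PySem.Str.len s2
instance (s1 : String) (s2 : String) : Decidable (Pre_real_offset s1 s2) := by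
  unfold Pre_real_offset; infer_instance

def pvWitness_real_offset : String × String := ("ab", "ba")

def Spec_real_offset (s1 : String) (s2 : String) (out : Int) : Prop := out = real_offset_alt s1 s2
instance (s1 : String) (s2 : String) (out : Int) : Decidable (Spec_real_offset s1 s2 out) := by
  unfold Spec_real_offset; infer_instance

-- ===== CLAIM (what is proved, stated in full; the proofs are below) =====
def Claim_equal_real_offset : Prop := ∀ (s1 : String) (s2 : String), Dom_real_offset s1 s2 → Pre_real_offset s1 s2 → Spec_real_offset s1 s2 (real_offset s1 s2)

-- ===== LEMMAS AND PROOFS =====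

-- B's fold of filters is one filter by the conjunction of all per-position tests.
theorem foldl_filter_eq (L : List Int) (p : Int → Int → Bool) (c : List Int) :
    L.foldl (fun c i => c.filter (p i)) c = c.filter (fun k => L.all (fun i => p i k)) := by
  induction L generalizing c with
  | nil => simp
  | cons i t ih => simp [List.foldl_cons, ih, List.filter_filter, Bool.and_comm]

theorem foldl_min_of_le (t : List Int) (x : Int) (h : ∀ y ∈ t, x ≤ y) :
    t.foldl min x = x := by
  induction t generalizing x with
  | nil => rfl
  | cons a t ih =>
      simp only [List.foldl_cons]
      rw [min_eq_left (h a (by simp))]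
      exact ih x (fun y hy => h y (by simp [hy]))

theorem ham_nonneg (l : List (Char × Char)) :
    0 ≤ (l.map (fun p => if p.1 ≠ p.2 then (1 : Int) else 0)).sum := by
  induction l with
  | nil => simp
  | cons a t ih => simp only [List.map_cons, List.sum_cons]; split_ifs <;> omega

theorem ham_zero_iff (x y : List Char) (hxy : x.length = y.length) :
    ((x.zip y).map (fun p => if p.1 ≠ p.2 then (1 : Int) else 0)).sum = 0 ↔ x = y := by
  induction x generalizing y with
  | nil => cases y with
    | nil => simp
    | cons b t => simp at hxy
  | cons a s ih =>
      cases y with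
      | nil => simp at hxy
      | cons b t =>
          simp only [List.zip_cons_cons, List.map_cons, List.sum_cons]
          have h := ham_nonneg (s.zip t)
          have hlen : s.length = t.length := by simpa using hxy
          by_cases hab : a = b
          · have hz : (if a ≠ b then (1 : Int) else 0) = 0 := by simp [hab]
            rw [hz, zero_add, ih t hlen]
            subst hab
            constructor
            · intro hst; rw [hst]
            · intro hst; injection hst
          · have : (if a ≠ b then (1 : Int) else 0) = 1 := by simp [hab]
            rw [this]
            constructor
            · intro hc; omega
            · intro hc; injection hc with h1 h2; exact absurd h1 hab

-- A's loop returns the head of the filtered list (first match), default ln.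
theorem loop_eq_filter (s1 s2 : String) (ln : Int) (L : List Int) (q : Int → Bool)
    (h : ∀ k ∈ L, (hamming_distance (PySem.Str.slice s1 (some k) none)
          (PySem.Str.slice s2 none (some (ln - k))) = 0) ↔ q k = true) :
    real_offset_loop s1 s2 ln L = (match L.filter q with | [] => ln | m :: _ => m) := by
  induction L with
  | nil => rfl
  | cons k t ih =>
      by_cases hP : hamming_distance (PySem.Str.slice s1 (some k) none)
          (PySem.Str.slice s2 none (some (ln - k))) = 0
      · have hq : q k = true := (h k (by simp)).mp hP
        simp [real_offset_loop, hP, hq]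
      · have hq : q k = false := by
          rcases Bool.eq_false_or_eq_true (q k) with ht | hf
          · exact absurd ((h k (by simp)).mpr ht) hP
          · exact hf
        simp only [real_offset_loop, if_neg hP, List.filter_cons, hq, Bool.false_eq_true,
          if_false]
        exact ih (fun j hj => h j (by simp [hj]))

-- the per-shift equivalence: A's "hamming distance zero" test ↔ B's all-positions test
theorem cond_equiv (s1 s2 : String) (k : Int)
    (hpre : s1.toList.length = s2.toList.length)
    (hk0 : 0 ≤ k) (hkn : k < (s1.toList.length : Int)) :
    (hamming_distance (PySem.Str.slice s1 (some k) none)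
        (PySem.Str.slice s2 none (some ((s1.toList.length : Int) - k))) = 0) ↔
    ((PySem.List.pyRange 0 (s1.toList.length : Int) 1).all (fun i =>
      decide ((s1.toList.length : Int) ≤ k + i) ||
      (PySem.Str.pyGet? s1 (k + i) == PySem.Str.pyGet? s2 i)) = true) := by
  set l1 := s1.toList with hl1
  set l2 := s2.toList with hl2
  set n := l1.length with hn
  set a := k.toNat with ha
  have hka : k = (a : Int) := by omega
  have han : a < n := by omega
  -- rewrite A's slices to drop/take
  have hsl1 : (PySem.Str.slice s1 (some k) none).toList = l1.drop a := by
    rw [PySem.Str.toList_slice, PySem.Chars.slice_eq_listSlice,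
      PySem.List.slice_from _ hk0]
  have hsl2 : (PySem.Str.slice s2 none (some ((n : Int) - k))).toList = l2.take (n - a) := by
    rw [PySem.Str.toList_slice, PySem.Chars.slice_eq_listSlice,
      PySem.List.slice_to _ (by omega)]
    congr 1
    omega
  have hlen : (l1.drop a).length = (l2.take (n - a)).length := by
    simp [List.length_drop, List.length_take]
    omega
  rw [show hamming_distance (PySem.Str.slice s1 (some k) none)
        (PySem.Str.slice s2 none (some ((n : Int) - k))) =
      (((l1.drop a).zip (l2.take (n - a))).map
        (fun p => if p.1 ≠ p.2 then (1 : Int) else 0)).sum from by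
    simp [hamming_distance, hsl1, hsl2]]
  rw [ham_zero_iff _ _ hlen]
  constructor
  · intro heq
    rw [List.all_eq_true]
    intro i hi
    rw [PySem.List.mem_pyRange_one] at hi
    by_cases hbig : (n : Int) ≤ k + i
    · simp [hbig]
    · have hi0 : 0 ≤ i := hi.1
      set j := i.toNat with hj
      have hji : i = (j : Int) := by omega
      have hjn : a + j < n := by omega
      have hget : PySem.List.pyGet? s1.toList (k + i) = PySem.List.pyGet? s2.toList i := by
        have e1 : PySem.List.pyGet? s1.toList (k + i) = l1[a + j]? := by
          rw [show k + i = ((a + j : Nat) : Int) by omega, PySem.List.pyGet?_natCast]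
        have d1 : (l1.drop a)[j]? = l1[a + j]? := by
          rw [List.getElem?_drop]
        have d2 : (l2.take (n - a))[j]? = l2[j]? :=
          List.getElem?_take_of_lt (by omega)
        rw [e1, hji, PySem.List.pyGet?_natCast, ← d1, ← d2, heq]
      rw [Bool.or_eq_true, beq_iff_eq]
      exact Or.inr hget
  · intro hall
    rw [List.all_eq_true] at hall
    apply List.ext_getElem?
    intro j
    by_cases hjlt : j < n - a
    · have hmem : ((j : Int)) ∈ PySem.List.pyRange 0 (n : Int) 1 := by
        rw [PySem.List.mem_pyRange_one]; omega
      have := hall _ hmem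
      have hnotbig : ¬ ((n : Int) ≤ k + (j : Int)) := by omega
      rw [Bool.or_eq_true, decide_eq_true_iff] at this
      rcases this with hb | hb
      · exact absurd hb hnotbig
      · rw [beq_iff_eq] at hb
        have e1 : PySem.List.pyGet? s1.toList (k + (j : Int)) = l1[a + j]? := by
          rw [show k + (j : Int) = ((a + j : Nat) : Int) by omega, PySem.List.pyGet?_natCast]
        have e2 : PySem.List.pyGet? s2.toList (j : Int) = l2[j]? := by
          rw [PySem.List.pyGet?_natCast]
        rw [List.getElem?_drop, List.getElem?_take_of_lt (by omega), ← e1, ← e2]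
        exact hb
    · have h1 : (l1.drop a)[j]? = none := by
        rw [List.getElem?_eq_none]
        simp [List.length_drop]
        omega
      have h2 : (l2.take (n - a))[j]? = none := by
        rw [List.getElem?_eq_none]
        simp [List.length_take]
        omega
      rw [h1, h2]

-- ===== VERDICT (by name: the statement is the Claim_ definition above) =====
theorem real_offset_spec : Claim_equal_real_offset := by
  intro s1 s2 _hdom hpre
  unfold Spec_real_offset
  have hpre' : s1.toList.length = s2.toList.length := by
    have := hpre
    unfold Pre_real_offset at this
    simpa using this
  set n := s1.toList.length with hn
  set q : Int → Bool := fun k =>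
    (PySem.List.pyRange 0 (n : Int) 1).all (fun i =>
      decide ((n : Int) ≤ k + i) ||
      (PySem.Str.pyGet? s1 (k + i) == PySem.Str.pyGet? s2 i)) with hq
  have hA : real_offset s1 s2 =
      (match (PySem.List.pyRange 0 (n : Int) 1).filter q with | [] => (n : Int) | m :: _ => m) := by
    show real_offset_loop s1 s2 (PySem.Str.len s1) (PySem.List.pyRange 0 (PySem.Str.len s1) 1) = _
    rw [show PySem.Str.len s1 = (n : Int) by simp [hn]]
    apply loop_eq_filter
    intro k hk
    rw [PySem.List.mem_pyRange_one] at hk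
    exact cond_equiv s1 s2 k hpre' hk.1 hk.2
  have hB : real_offset_alt s1 s2 =
      (match (PySem.List.pyRange 0 (n : Int) 1).filter q with | [] => (n : Int) | m :: _ => m) := by
    show (match PySem.List.min?
        ((PySem.List.pyRange 0 (PySem.Str.len s1) 1).foldl
          (fun cands i => cands.filter (fun k =>
            decide (PySem.Str.len s1 ≤ k + i) ||
            (PySem.Str.pyGet? s1 (k + i) == PySem.Str.pyGet? s2 i)))
          (PySem.List.pyRange 0 (PySem.Str.len s1) 1)) (fun x => x) with
      | some m => m
      | none => PySem.Str.len s1) = _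
    rw [show PySem.Str.len s1 = (n : Int) by simp [hn]]
    rw [foldl_filter_eq]
    have hsorted : ((PySem.List.pyRange 0 (n : Int) 1).filter q).Pairwise (· < ·) :=
      List.Pairwise.filter _ (PySem.List.pairwise_lt_pyRange_one 0 (n : Int))
    cases hc : (PySem.List.pyRange 0 (n : Int) 1).filter q with
    | nil => rfl
    | cons m t =>
        rw [PySem.List.min?_id_cons]
        have hmin : t.foldl min m = m := by
          apply foldl_min_of_le
          intro y hy
          rw [hc] at hsorted
          exact le_of_lt (List.rel_of_pairwise_cons hsorted hy)
        simp [hmin]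
  rw [hA, hB]
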